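-- pv_equiv track=rewrite | github.com/Stendhalsynd/baekjoon-algorithm-study | week4/BOJ_21608/상어초등학교_이동혁.py | find_sear_condition3
-- ===== SOURCE A (Python) =====
-- def find_sear_condition3(lst):
--     answer = []
--
--     min_num = 100
--     for index in lst:
--         if index[0] < min_num:
--             min_num = index[0]
--
--     for index in lst:
--         if index[0] == min_num:
--             answer.append(index)
--
--     return answer
-- ===== SOURCE B (Python) =====
-- def find_sear_condition3(lst):
--     min_num = 100
--     answer = []
--     for index in lst:
--         if index[0] < min_num:
--             min_num = index[0]
--             answer = [index]
--         elif index[0] == min_num: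
--             answer.append(index)
--     return answer
-- ===== Notes on version B (the rewrite author's own statement) =====
-- stated objective: alternative
-- what changed: A scans the list twice (first to find the minimum first coordinate capped at 100, then to collect matching elements); B makes a single pass maintaining the running minimum and a candidate list that is reset whenever a smaller first coordinate appears.
import Mathlib
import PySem

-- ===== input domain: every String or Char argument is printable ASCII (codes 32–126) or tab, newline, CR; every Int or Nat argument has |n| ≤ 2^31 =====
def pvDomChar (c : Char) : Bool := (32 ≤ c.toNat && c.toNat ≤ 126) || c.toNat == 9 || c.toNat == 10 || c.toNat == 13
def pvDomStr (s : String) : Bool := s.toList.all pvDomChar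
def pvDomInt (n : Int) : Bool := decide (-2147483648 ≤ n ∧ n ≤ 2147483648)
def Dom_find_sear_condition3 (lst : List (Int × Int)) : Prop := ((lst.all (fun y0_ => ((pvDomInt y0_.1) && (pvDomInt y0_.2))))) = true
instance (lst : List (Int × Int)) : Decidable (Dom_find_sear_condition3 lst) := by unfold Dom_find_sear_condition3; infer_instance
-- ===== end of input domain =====

-- B replaces A's two sequential scans (find the minimum first coordinate, then collect matches)
-- by one scan keeping the running minimum and a candidate list reset on each strict improvement
-- (objective: alternative).

-- ===== PORT A =====
-- two passes: first fold computes min_num (starting at 100), second fold collects matches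
def find_sear_condition3 (lst : List (Int × Int)) : List (Int × Int) :=
  let min_num := lst.foldl (fun m index => if index.1 < m then index.1 else m) 100
  lst.foldl (fun answer index => if index.1 == min_num then answer ++ [index] else answer) []

-- ===== PORT B =====
-- the body of B's single loop: improve-and-reset / equal-and-append / skip
def pvStepB (st : Int × List (Int × Int)) (index : Int × Int) : Int × List (Int × Int) :=
  if index.1 < st.1 then (index.1, [index])
  else if index.1 == st.1 then (st.1, st.2 ++ [index])
  else st

def find_sear_condition3_alt (lst : List (Int × Int)) : List (Int × Int) :=
  (lst.foldl pvStepB (100, [])).2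

-- ===== PRECONDITION & SPEC =====
def Spec_find_sear_condition3 (lst : List (Int × Int)) (out : List (Int × Int)) : Prop := out = find_sear_condition3_alt lst
instance (lst : List (Int × Int)) (out : List (Int × Int)) : Decidable (Spec_find_sear_condition3 lst out) := by unfold Spec_find_sear_condition3; infer_instance

-- ===== CLAIM (what is proved, stated in full; the proofs are below) =====
def Claim_equal_find_sear_condition3 : Prop := ∀ (lst : List (Int × Int)), Dom_find_sear_condition3 lst → Spec_find_sear_condition3 lst (find_sear_condition3 lst)

-- ===== LEMMAS AND PROOFS =====

-- A's first fold, as a function of the starting value (definitionally A's min_num at m = 100)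
def pvMin (m : Int) (lst : List (Int × Int)) : Int :=
  lst.foldl (fun mv index => if index.1 < mv then index.1 else mv) m

theorem pvMin_le (lst : List (Int × Int)) (m : Int) : pvMin m lst ≤ m := by
  induction lst generalizing m with
  | nil => simp [pvMin]
  | cons q s ih =>
    by_cases h : q.1 < m
    · exact le_trans (by simpa [pvMin, h] using ih q.1) (le_of_lt h)
    · simpa [pvMin, h] using ih m

-- A's second fold is the accumulator followed by a filter
theorem collect_eq_filter (M : Int) (lst : List (Int × Int)) (a0 : List (Int × Int)) :
    lst.foldl (fun answer index => if index.1 == M then answer ++ [index] else answer) a0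
      = a0 ++ lst.filter (fun index => index.1 == M) := by
  induction lst generalizing a0 with
  | nil => simp
  | cons p t ih =>
    rw [List.foldl_cons]
    by_cases h : p.1 = M
    · have step : (if (p.1 == M) then a0 ++ [p] else a0) = a0 ++ [p] := by simp [h]
      have hb : (p.1 == M) = true := by simp [h]
      rw [step, ih]
      simp [List.filter, hb]
    · have step : (if (p.1 == M) then a0 ++ [p] else a0) = a0 := by simp [h]
      rw [step, ih]
      have hb : (p.1 == M) = false := by simp [h]
      simp [List.filter, hb]

-- invariant of B's single fold: the min component is A's min fold, and the answer component
-- is the incoming accumulator ++ filter when no improvement happened, else a pure filter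
theorem alt_fold_invariant (lst : List (Int × Int)) (m : Int) (ans : List (Int × Int)) :
    lst.foldl pvStepB (m, ans)
    = (pvMin m lst,
       (if pvMin m lst = m then ans else []) ++ lst.filter (fun index => index.1 == pvMin m lst)) := by
  induction lst generalizing m ans with
  | nil => simp [pvMin]
  | cons p t ih =>
    by_cases h1 : p.1 < m
    · have hm : pvMin m (p :: t) = pvMin p.1 t := by simp [pvMin, List.foldl, h1]
      have hne : pvMin p.1 t ≠ m := by have := pvMin_le t p.1; omega
      have step : pvStepB (m, ans) p = (p.1, [p]) := by simp [pvStepB, h1]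
      rw [List.foldl_cons, step, ih, hm]
      by_cases h2 : pvMin p.1 t = p.1
      · have hne2 : p.1 ≠ m := by omega
        simp [List.filter, h2, hne2]
      · have hpne : (p.1 == pvMin p.1 t) = false := by
          simp only [beq_eq_false_iff_ne, ne_eq]
          exact fun h => h2 h.symm
        simp [hne, List.filter, hpne, h2]
    · have hm : pvMin m (p :: t) = pvMin m t := by simp [pvMin, List.foldl, h1]
      by_cases h2 : p.1 = m
      · have step : pvStepB (m, ans) p = (m, ans ++ [p]) := by simp [pvStepB, h2]
        rw [List.foldl_cons, step, ih, hm]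
        by_cases h3 : pvMin m t = m
        · simp [h3, List.filter, h2]
        · have hpne : (p.1 == pvMin m t) = false := by
            have := pvMin_le t m
            simp only [beq_eq_false_iff_ne, ne_eq]
            omega
          simp [h3, List.filter, hpne]
      · have hpne : (p.1 == pvMin m t) = false := by
          have := pvMin_le t m
          simp only [beq_eq_false_iff_ne, ne_eq]
          omega
        have step : pvStepB (m, ans) p = (m, ans) := by simp [pvStepB, h1, h2]
        rw [List.foldl_cons, step, ih, hm]
        simp [List.filter, hpne]

-- ===== VERDICT (by name: the statement is the Claim_ definition above) =====
theorem find_sear_condition3_spec : Claim_equal_find_sear_condition3 := by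
  intro lst _
  unfold Spec_find_sear_condition3 find_sear_condition3 find_sear_condition3_alt
  rw [alt_fold_invariant, show (lst.foldl (fun m index => if index.1 < m then index.1 else m) 100) = pvMin 100 lst from rfl,
      collect_eq_filter]
  split <;> simp
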